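-- pv_equiv track=rewrite | github.com/FrunzyR/Matrici-pbinfo | 219/main.py | solve
-- ===== SOURCE A (Python) =====
-- def solve(row, column):
--     matrix = []
--     number = row * column
--     for i in range(row):
--         new_row = []
--         for j in range(column):
--             new_row.append(number)
--             number -= 1
--         matrix.append(new_row)
--     return matrix
-- ===== SOURCE B (Python) =====
-- def solve(row, column):
--     if row <= 0:
--         return []
--     flat = list(range(row * column, 0, -1))
--     return [flat[i * column:(i + 1) * column] for i in range(row)]
-- ===== Notes on version B (the rewrite author's own statement) =====
-- stated objective: simpler
-- what changed: Replaces the nested per-element append loop with a running decrement counter by building the whole descending sequence once with range(row*column, 0, -1) and chunking it into rows by slicing.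
import Mathlib
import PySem

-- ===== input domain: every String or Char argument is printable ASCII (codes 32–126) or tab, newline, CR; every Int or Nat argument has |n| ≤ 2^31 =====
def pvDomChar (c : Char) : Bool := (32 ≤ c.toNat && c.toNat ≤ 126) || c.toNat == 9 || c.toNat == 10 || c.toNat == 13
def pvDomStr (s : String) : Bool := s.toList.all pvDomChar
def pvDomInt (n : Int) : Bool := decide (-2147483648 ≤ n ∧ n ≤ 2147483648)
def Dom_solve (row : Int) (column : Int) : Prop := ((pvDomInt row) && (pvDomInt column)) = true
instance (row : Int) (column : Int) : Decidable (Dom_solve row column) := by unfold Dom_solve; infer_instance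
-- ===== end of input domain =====

-- B builds the whole descending sequence once with range(row*column, 0, -1) and chunks it into rows by slicing,
-- replacing A's nested append loop with a running decrement counter (objective: simpler).

-- ===== PORT A =====
def solve (row : Int) (column : Int) : List (List Int) :=
  let number := row * column
  let res := (PySem.List.pyRange 0 row 1).foldl
    (fun (st : List (List Int) × Int) _ =>
      let inner := (PySem.List.pyRange 0 column 1).foldl
        (fun (st2 : List Int × Int) _ => (st2.1 ++ [st2.2], st2.2 - 1)) ([], st.2)
      (st.1 ++ [inner.1], inner.2))
    ([], number)
  res.1

-- ===== PORT B =====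
def solve_alt (row : Int) (column : Int) : List (List Int) :=
  if row ≤ 0 then []
  else
    let flat := PySem.List.pyRange (row * column) 0 (-1)
    (PySem.List.pyRange 0 row 1).map
      (fun i => PySem.List.slice flat (some (i * column)) (some ((i + 1) * column)))

-- ===== PRECONDITION & SPEC =====
def Spec_solve (row : Int) (column : Int) (out : List (List Int)) : Prop := out = solve_alt row column
instance (row : Int) (column : Int) (out : List (List Int)) : Decidable (Spec_solve row column out) := by unfold Spec_solve; infer_instance

-- ===== CLAIM (what is proved, stated in full; the proofs are below) =====
def Claim_equal_solve : Prop := ∀ (row : Int) (column : Int), Dom_solve row column → Spec_solve row column (solve row column)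

-- ===== LEMMAS AND PROOFS =====

-- A's inner loop appends a descending run and ends with the start value minus the iteration count.
lemma inner_eq (l : List Int) (acc : List Int) (m : Int) :
    l.foldl (fun (st2 : List Int × Int) _ => (st2.1 ++ [st2.2], st2.2 - 1)) (acc, m)
      = (acc ++ PySem.List.pyRange m (m - l.length) (-1), m - l.length) := by
  induction l generalizing acc m with
  | nil => simp [PySem.List.pyRange_neg_one_eq_nil le_rfl]
  | cons a tl ih =>
    simp only [List.foldl_cons, List.length_cons, ih]
    push_cast
    rw [PySem.List.pyRange_neg_one_cons (a := m) (b := m - (↑tl.length + 1)) (by omega)]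
    have h1 : m - (↑(tl.length) + 1) = m - 1 - ↑tl.length := by ring
    rw [h1]
    simp

lemma drop_pyRange_neg_one (k : Nat) (a b : Int) :
    (PySem.List.pyRange a b (-1)).drop k = PySem.List.pyRange (a - k) b (-1) := by
  induction k generalizing a with
  | zero => simp
  | succ k ih =>
    by_cases h : b < a
    · rw [PySem.List.pyRange_neg_one_cons h]
      rw [List.drop_succ_cons, ih]
      congr 1
      push_cast; ring
    · rw [PySem.List.pyRange_neg_one_eq_nil (by omega),
          PySem.List.pyRange_neg_one_eq_nil (by push_cast; omega)]
      simp

lemma take_pyRange_neg_one (k : Nat) (a b : Int) (h : b + k ≤ a) :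
    (PySem.List.pyRange a b (-1)).take k = PySem.List.pyRange a (a - k) (-1) := by
  induction k generalizing a with
  | zero => simp [PySem.List.pyRange_neg_one_eq_nil le_rfl]
  | succ k ih =>
    push_cast at h ⊢
    rw [PySem.List.pyRange_neg_one_cons (a := a) (b := b) (by omega)]
    rw [List.take_succ_cons, ih (a - 1) (by omega)]
    rw [PySem.List.pyRange_neg_one_cons (a := a) (b := a - (↑k + 1)) (by omega)]
    have h5 : a - (↑k + 1) = a - 1 - ↑k := by ring
    rw [h5]

-- A's outer loop, positive column: row k is the descending run of length `c` starting at m - k*c.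
lemma outer_pos (c : Int) (hc : 0 < c) (l : List Int) (acc : List (List Int)) (m : Int) :
    l.foldl (fun (st : List (List Int) × Int) _ =>
        let inner := (PySem.List.pyRange 0 c 1).foldl
          (fun (st2 : List Int × Int) _ => (st2.1 ++ [st2.2], st2.2 - 1)) ([], st.2)
        (st.1 ++ [inner.1], inner.2)) (acc, m)
      = (acc ++ (List.range l.length).map
          (fun (k : Nat) => PySem.List.pyRange (m - (k : Int) * c) (m - (k : Int) * c - c) (-1)),
         m - l.length * c) := by
  have hlen : ((PySem.List.pyRange 0 c 1).length : Int) = c := by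
    rw [PySem.List.length_pyRange_one]; omega
  induction l generalizing acc m with
  | nil => simp
  | cons x tl ih =>
    simp only [List.foldl_cons]
    rw [inner_eq, hlen]
    simp only [List.nil_append]
    rw [ih]
    simp only [List.length_cons]
    rw [List.range_succ_eq_map, List.map_cons, List.map_map]
    have hmap : (List.range tl.length).map
          ((fun (k : Nat) => PySem.List.pyRange (m - (k : Int) * c) (m - (k : Int) * c - c) (-1)) ∘ Nat.succ)
        = (List.range tl.length).map
          (fun (k : Nat) => PySem.List.pyRange (m - c - (k : Int) * c) (m - c - (k : Int) * c - c) (-1)) := by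
      apply List.map_congr_left
      intro k _
      simp only [Function.comp]
      congr 1 <;> (push_cast; ring_nf)
    rw [hmap, Prod.mk.injEq]
    refine ⟨by simp, by push_cast; ring_nf⟩

-- A's outer loop, nonpositive column: every row is empty and the counter never moves.
lemma foldl_const_nil (l : List Int) (acc : List (List Int)) (m : Int) :
    l.foldl (fun (st : List (List Int) × Int) _ => (st.1 ++ [([] : List Int)], st.2)) (acc, m)
      = (acc ++ l.map (fun _ => ([] : List Int)), m) := by
  induction l generalizing acc with
  | nil => simp
  | cons x tl ih =>
    simp only [List.foldl_cons]
    rw [ih]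
    simp

lemma slice_nil (a b : Int) : PySem.List.slice ([] : List Int) (some a) (some b) = [] := by
  simp [PySem.List.slice]

lemma solve_eq_solve_alt (row column : Int) : solve row column = solve_alt row column := by
  by_cases hr : row ≤ 0
  · simp [solve, solve_alt, PySem.List.pyRange_one_eq_nil hr, hr]
  · rw [not_le] at hr
    by_cases hc : column ≤ 0
    · have hflat : PySem.List.pyRange (row * column) 0 (-1) = [] :=
        PySem.List.pyRange_neg_one_eq_nil (mul_nonpos_of_nonneg_of_nonpos (by omega) hc)
      simp only [solve, solve_alt, if_neg (by omega : ¬ row ≤ 0), hflat, slice_nil,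
        PySem.List.pyRange_one_eq_nil hc, List.foldl_nil]
      rw [foldl_const_nil]
      simp
    · rw [not_le] at hc
      have hcn : ((column.toNat : Int)) = column := Int.toNat_of_nonneg (by omega)
      simp only [solve, solve_alt, if_neg (by omega : ¬ row ≤ 0)]
      rw [outer_pos column hc]
      simp only [List.nil_append]
      rw [PySem.List.pyRange_one 0 row, List.map_map]
      have hlen : (row - 0).toNat = row.toNat := by omega
      rw [hlen]
      simp only [List.length_map, List.length_range]
      apply List.map_congr_left
      intro k hk
      rw [List.mem_range] at hk
      simp only [Function.comp, zero_add]
      have h1 : (k : Int) * column = ((k * column.toNat : Nat) : Int) := by push_cast; rw [hcn]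
      have h2 : ((k : Int) + 1) * column = ((k * column.toNat : Nat) : Int) + ((column.toNat : Nat) : Int) := by
        push_cast; rw [hcn]; ring
      rw [h1, h2, PySem.List.slice_natCast_add, drop_pyRange_neg_one]
      have hle : (0 : Int) + (column.toNat : Int) ≤ row * column - ((k * column.toNat : Nat) : Int) := by
        have hrow : ((row.toNat : Int)) = row := Int.toNat_of_nonneg (by omega)
        have h3 : ((k : Int) + 1) * column ≤ row * column := by
          have h := Nat.mul_le_mul_right column.toNat (show k + 1 ≤ row.toNat by omega)
          have h' : (((k + 1) * column.toNat : Nat) : Int) ≤ ((row.toNat * column.toNat : Nat) : Int) := by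
            exact_mod_cast h
          push_cast at h'
          rw [hcn, hrow] at h'
          linarith
        push_cast
        rw [hcn]
        linarith
      rw [take_pyRange_neg_one _ _ _ hle]
      congr 1
      push_cast
      rw [hcn]

-- ===== VERDICT (by name: the statement is the Claim_ definition above) =====
theorem solve_spec : Claim_equal_solve := by
  intro row column _
  unfold Spec_solve
  exact solve_eq_solve_alt row column
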